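-- pv_equiv track=rewrite | github.com/dennisngugiwambui/Biometrics-system | backend/api_gateway/api/routes/reports.py | _group_summary_rows_by_class
-- ===== SOURCE A (Python) =====
-- def _group_summary_rows_by_class(rows: list[list], class_col: int = 2) -> list[tuple[str, list[list]]]:
--     buckets: dict[str, list[list]] = {}
--     for row in rows:
--         cls = (row[class_col] or "").strip() if class_col < len(row) else ""
--         cls = cls or "Unassigned"
--         buckets.setdefault(cls, []).append(row)
--     order = sorted(k for k in buckets if k != "Unassigned")
--     if "Unassigned" in buckets:
--         order.append("Unassigned")
--     return [(k, buckets[k]) for k in order]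
-- ===== SOURCE B (Python) =====
-- def _group_summary_rows_by_class(rows: list[list], class_col: int = 2) -> list[tuple[str, list[list]]]:
--     def key(row):
--         cls = (row[class_col] or "").strip() if class_col < len(row) else ""
--         return cls or "Unassigned"
--     out: list[tuple[str, list[list]]] = []
--     for row in sorted(rows, key=lambda r: (key(r) == "Unassigned", key(r))):
--         k = key(row)
--         if out and out[-1][0] == k:
--             out[-1][1].append(row)
--         else:
--             out.append((k, [row]))
--     return out
-- ===== Notes on version B (the rewrite author's own statement) =====
-- stated objective: alternative
-- what changed: Replaced dict-bucketing followed by a key sort with a single stable sort of all rows on the key (cls=='Unassigned', cls) followed by one linear scan that emits contiguous groups (sort-then-groupby instead of hash-bucket-then-sort-keys).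
import Mathlib
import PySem

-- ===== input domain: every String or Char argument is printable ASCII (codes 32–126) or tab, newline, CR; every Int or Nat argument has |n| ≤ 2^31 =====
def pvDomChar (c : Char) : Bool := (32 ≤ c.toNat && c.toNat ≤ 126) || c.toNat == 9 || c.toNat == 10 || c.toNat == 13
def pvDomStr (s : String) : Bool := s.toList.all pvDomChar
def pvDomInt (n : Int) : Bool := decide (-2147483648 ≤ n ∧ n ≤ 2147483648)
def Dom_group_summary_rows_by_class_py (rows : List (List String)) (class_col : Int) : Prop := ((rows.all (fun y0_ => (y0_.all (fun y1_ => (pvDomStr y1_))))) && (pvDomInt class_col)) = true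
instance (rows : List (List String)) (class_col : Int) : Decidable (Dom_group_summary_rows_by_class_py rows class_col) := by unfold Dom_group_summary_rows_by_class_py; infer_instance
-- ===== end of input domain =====

-- B replaces A's dict-bucketing + key sort by one stable sort of all rows on (cls=="Unassigned", cls)
-- followed by a single scan emitting contiguous groups (alternative algorithm, same cost class).

-- ===== PORT A =====
-- cls = (row[class_col] or "").strip() if class_col < len(row) else "";  cls = cls or "Unassigned"
def pvClsA (class_col : Int) (row : List String) : String :=
  let cls :=
    if class_col < (row.length : Int) then
      PySem.Str.strip
        (let v := (PySem.List.pyGet? row class_col).getD "" -- total form: Pre_ excludes the IndexError inputs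
         if v = "" then "" else v)                           -- (v or "")
    else ""
  if cls = "" then "Unassigned" else cls                     -- cls or "Unassigned"

def group_summary_rows_by_class_py (rows : List (List String)) (class_col : Int) : List (String × List (List String)) :=
  -- buckets.setdefault(cls, []).append(row)  ==  buckets[cls] = buckets.get(cls, []) + [row]
  let buckets := rows.foldl (fun d row => d.modify (pvClsA class_col row) [] (fun v => v ++ [row])) PySem.Dict.empty
  let order := PySem.List.sorted (buckets.keys.filter (fun k => k != "Unassigned")) (fun k => k) false
  let order2 := if buckets.contains "Unassigned" then order ++ ["Unassigned"] else order
  order2.map (fun k => (k, buckets.getD k []))               -- buckets[k]: k is always a key, total form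

-- ===== PORT B =====
def pvKeyB (class_col : Int) (row : List String) : String :=
  let cls :=
    if class_col < (row.length : Int) then
      PySem.Str.strip
        (let v := (PySem.List.pyGet? row class_col).getD ""
         if v = "" then "" else v)
    else ""
  if cls = "" then "Unassigned" else cls

-- the scan: append to the last group while the key repeats, else open a new group
def pvScanGo (key : List String → String) :
    List (String × List (List String)) → List (List String) → List (String × List (List String))
  | out, [] => out
  | out, r :: rs =>
    match out.getLast? with
    | some p =>
      if p.1 = key r then pvScanGo key (out.dropLast ++ [(p.1, p.2 ++ [r])]) rs
      else pvScanGo key (out ++ [(key r, [r])]) rs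
    | none => pvScanGo key (out ++ [(key r, [r])]) rs

def group_summary_rows_by_class_py_alt (rows : List (List String)) (class_col : Int) : List (String × List (List String)) :=
  pvScanGo (pvKeyB class_col) []
    (PySem.List.sorted2 rows (fun r => pvKeyB class_col r == "Unassigned") (fun r => pvKeyB class_col r) false)

-- ===== PRECONDITION & SPEC =====
-- Pre_ excludes exactly the inputs where Python A raises IndexError: some row with class_col < -len(row)
-- (row[class_col] is evaluated whenever class_col < len(row), so a too-negative index raises).
def Pre_group_summary_rows_by_class_py (rows : List (List String)) (class_col : Int) : Prop :=
  ∀ row ∈ rows, -(row.length : Int) ≤ class_col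
instance (rows : List (List String)) (class_col : Int) : Decidable (Pre_group_summary_rows_by_class_py rows class_col) := by
  unfold Pre_group_summary_rows_by_class_py; infer_instance

def pvWitness_group_summary_rows_by_class_py : List (List String) × Int :=
  ([["a", "b", "Math"], ["x", "y"], ["p", "q", "  "], ["c", "d", "Math"]], 2)

def Spec_group_summary_rows_by_class_py (rows : List (List String)) (class_col : Int) (out : List (String × List (List String))) : Prop := out = group_summary_rows_by_class_py_alt rows class_col
instance (rows : List (List String)) (class_col : Int) (out : List (String × List (List String))) : Decidable (Spec_group_summary_rows_by_class_py rows class_col out) := by unfold Spec_group_summary_rows_by_class_py; infer_instance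

-- ===== CLAIM (what is proved, stated in full; the proofs are below) =====
def Claim_equal_group_summary_rows_by_class_py : Prop := ∀ (rows : List (List String)) (class_col : Int), Dom_group_summary_rows_by_class_py rows class_col → Pre_group_summary_rows_by_class_py rows class_col → Spec_group_summary_rows_by_class_py rows class_col (group_summary_rows_by_class_py rows class_col)

-- ===== LEMMAS AND PROOFS =====

-- the common shape both ports are reduced to: sorted keys (Unassigned last), each paired with its filter
def pvOrder (class_col : Int) (rows : List (List String)) : List String :=
  (PySem.List.sorted ((PySem.List.dedup (rows.map (pvClsA class_col))).filter (fun k => k != "Unassigned")) (fun k => k) false)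
    ++ (if "Unassigned" ∈ PySem.List.dedup (rows.map (pvClsA class_col)) then ["Unassigned"] else [])

def pvTarget (class_col : Int) (rows : List (List String)) : List (String × List (List String)) :=
  (pvOrder class_col rows).map (fun c => (c, rows.filter (fun r => pvClsA class_col r == c)))

theorem flatMap_congr_mem {α β : Type} {l : List α} {f g : α → List β}
    (h : ∀ a ∈ l, f a = g a) : l.flatMap f = l.flatMap g := by
  induction l with
  | nil => rfl
  | cons a l ih =>
    rw [List.flatMap_cons, List.flatMap_cons, h a (by simp), ih (fun b hb => h b (by simp [hb]))]

-- ---- A side: the bucket dict is keys = dedup of the classes, values = filters ----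

theorem bucketsA_keys (rows : List (List String)) (cc : Int) :
    (rows.foldl (fun d row => d.modify (pvClsA cc row) [] (fun v => v ++ [row])) PySem.Dict.empty).keys
      = PySem.List.dedup (rows.map (pvClsA cc)) := by
  rw [PySem.Dict.keys_foldl_modify_key rows (pvClsA cc) [] (fun _ x v => v ++ [x]) PySem.Dict.empty]
  rw [PySem.Dict.keys_empty, PySem.List.dedup_eq_ofList]; rfl

theorem bucketsA_getD (rows : List (List String)) (cc : Int) (c : String) :
    (rows.foldl (fun d row => d.modify (pvClsA cc row) [] (fun v => v ++ [row])) PySem.Dict.empty).getD c []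
      = rows.filter (fun r => pvClsA cc r == c) := by
  have h : rows.foldl (fun d row => d.modify (pvClsA cc row) [] (fun v => v ++ [row])) PySem.Dict.empty
      = (rows.map (fun r => (pvClsA cc r, r))).foldl (fun d p => d.modify p.1 [] (fun v => v ++ [p.2])) PySem.Dict.empty := by
    rw [List.foldl_map]
  rw [h, PySem.Dict.getD_foldl_modify_append]
  simp [List.filter_map, Function.comp_def, List.map_map]

theorem A_char (rows : List (List String)) (cc : Int) :
    group_summary_rows_by_class_py rows cc = pvTarget cc rows := by
  simp only [group_summary_rows_by_class_py, pvTarget, pvOrder]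
  rw [bucketsA_keys, PySem.Dict.contains_eq_decide_mem_keys, bucketsA_keys]
  simp only [decide_eq_true_eq]
  split_ifs with h
  · rw [List.map_congr_left]
    intro k _; rw [bucketsA_getD]
  · rw [List.append_nil, List.map_congr_left]
    intro k _; rw [bucketsA_getD]

-- ---- generic: a stable insertion sort is the key-sorted concatenation of the filters ----

theorem ins_pass {α κ : Type} [LinearOrder κ] (f : α → κ) (x : α) (b rest : List α)
    (hb : ∀ y ∈ b, ¬ f x < f y) :
    PySem.List.insertBy (fun a b => decide (f a < f b)) x (b ++ rest)
      = b ++ PySem.List.insertBy (fun a b => decide (f a < f b)) x rest := by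
  induction b with
  | nil => rfl
  | cons y b ih =>
    rw [List.cons_append, PySem.List.insertBy.eq_2]
    have hxy : decide (f x < f y) = false := by simpa using hb y (by simp)
    rw [hxy, if_neg (by simp), ih (fun z hz => hb z (by simp [hz])), List.cons_append]

theorem ins_front {α κ : Type} [LinearOrder κ] (f : α → κ) (x : α) (L : List α)
    (h : ∀ y, L.head? = some y → f x < f y) :
    PySem.List.insertBy (fun a b => decide (f a < f b)) x L = x :: L := by
  cases L with
  | nil => rfl
  | cons y ys =>
    rw [PySem.List.insertBy.eq_2]
    have hxy : decide (f x < f y) = true := by simpa using h y rfl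
    rw [hxy, if_pos rfl]

theorem ins_blocks_mem {α κ : Type} [LinearOrder κ] (f : α → κ) (x : α) :
    ∀ (ks : List κ) (g : κ → List α),
      ks.Pairwise (· < ·) →
      (∀ k ∈ ks, g k ≠ [] ∧ ∀ y ∈ g k, f y = k) →
      f x ∈ ks →
      PySem.List.insertBy (fun a b => decide (f a < f b)) x (ks.flatMap g)
        = ks.flatMap (fun k => if k = f x then g k ++ [x] else g k)
  | [], g, _, _, hmem => by simp at hmem
  | k :: ks, g, hp, hg, hmem => by
    rw [List.flatMap_cons, List.flatMap_cons]
    have hpc := List.pairwise_cons.1 hp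
    by_cases hk : k = f x
    · subst hk
      rw [ins_pass f x (g (f x)) _ (fun y hy => by
            rw [(hg (f x) (by simp)).2 y hy]; exact lt_irrefl _)]
      have hfront : PySem.List.insertBy (fun a b => decide (f a < f b)) x (ks.flatMap g)
          = x :: ks.flatMap g := by
        apply ins_front
        intro y hy
        have hy' : y ∈ ks.flatMap g := List.mem_of_mem_head? hy
        rcases List.mem_flatMap.1 hy' with ⟨k', hk', hyk'⟩
        rw [(hg k' (by simp [hk'])).2 y hyk']
        exact hpc.1 k' hk'
      rw [hfront, if_pos rfl]
      have hcongr : ∀ k' ∈ ks, (if k' = f x then g k' ++ [x] else g k') = g k' := by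
        intro k' hk'
        exact if_neg (ne_of_gt (hpc.1 k' hk'))
      rw [flatMap_congr_mem hcongr]
      simp
    · have hmem' : f x ∈ ks := by
        rcases List.mem_cons.1 hmem with h | h
        · exact absurd h.symm hk
        · exact h
      have hklt : k < f x := hpc.1 (f x) hmem'
      rw [ins_pass f x (g k) _ (fun y hy => by
            rw [(hg k (by simp)).2 y hy]; exact not_lt.2 (le_of_lt hklt))]
      rw [ins_blocks_mem f x ks g hpc.2 (fun k' hk' => hg k' (by simp [hk'])) hmem']
      rw [if_neg hk]

theorem ins_blocks_new {α κ : Type} [LinearOrder κ] (f : α → κ) (x : α) :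
    ∀ (ks : List κ) (g : κ → List α),
      ks.Pairwise (· < ·) →
      (∀ k ∈ ks, g k ≠ [] ∧ ∀ y ∈ g k, f y = k) →
      f x ∉ ks →
      PySem.List.insertBy (fun a b => decide (f a < f b)) x (ks.flatMap g)
        = (PySem.List.insertBy (fun a b => decide (a < b)) (f x) ks).flatMap
            (fun k => if k = f x then [x] else g k)
  | [], g, _, _, _ => by simp [PySem.List.insertBy]
  | k :: ks, g, hp, hg, hmem => by
    have hpc := List.pairwise_cons.1 hp
    have hkne : k ≠ f x := fun h => hmem (by simp [h])
    rw [List.flatMap_cons, PySem.List.insertBy.eq_2 (before := fun a b => decide (a < b))]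
    by_cases hlt : f x < k
    · rw [if_pos (by simpa using hlt)]
      have hfront : PySem.List.insertBy (fun a b => decide (f a < f b)) x (g k ++ ks.flatMap g)
          = x :: (g k ++ ks.flatMap g) := by
        apply ins_front
        intro y hy
        have hy' : y ∈ g k ++ ks.flatMap g := List.mem_of_mem_head? hy
        rcases List.mem_append.1 hy' with h | h
        · rw [(hg k (by simp)).2 y h]; exact hlt
        · rcases List.mem_flatMap.1 h with ⟨k', hk', hyk'⟩
          rw [(hg k' (by simp [hk'])).2 y hyk']
          exact lt_trans hlt (hpc.1 k' hk')
      rw [hfront, List.flatMap_cons, List.flatMap_cons, if_pos rfl, if_neg hkne]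
      have hcongr : ∀ k' ∈ ks, (if k' = f x then [x] else g k') = g k' := by
        intro k' hk'
        refine if_neg (fun h => hmem ?_)
        rw [← h]; exact List.mem_cons_of_mem _ hk'
      rw [flatMap_congr_mem hcongr]
      simp
    · rw [if_neg (by simpa using hlt)]
      rw [ins_pass f x (g k) _ (fun y hy => by rw [(hg k (by simp)).2 y hy]; exact hlt)]
      rw [ins_blocks_new f x ks g hpc.2 (fun k' hk' => hg k' (by simp [hk'])) (fun h => hmem (by simp [h]))]
      rw [List.flatMap_cons, if_neg hkne]

theorem dedup_concat {κ : Type} [BEq κ] [LawfulBEq κ] (l : List κ) (a : κ) :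
    PySem.List.dedup (l ++ [a]) = if a ∈ l then PySem.List.dedup l else PySem.List.dedup l ++ [a] := by
  simp only [PySem.List.dedup_eq_ofList, PySem.Set.ofList, List.foldl_append, List.foldl_cons, List.foldl_nil]
  show PySem.Set.add _ a = _
  rw [PySem.Set.add]
  have hc : (List.foldl PySem.Set.add PySem.Set.empty l).contains a = decide (a ∈ l) := by
    rw [PySem.Set.contains, List.contains_eq_mem]
    exact decide_eq_decide.2 (PySem.Set.mem_ofList l a)
  rw [hc]
  by_cases h : a ∈ l <;> simp [h]

theorem stable_sort_eq_blocks {α κ : Type} [LinearOrder κ] [BEq κ] [LawfulBEq κ] (f : α → κ) (xs : List α) :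
    PySem.List.sorted xs f false
      = (PySem.List.sorted (PySem.List.dedup (xs.map f)) (fun k => k) false).flatMap
          (fun k => xs.filter (fun y => decide (f y = k))) := by
  induction xs using List.reverseRecOn with
  | nil => rfl
  | append_singleton xs x ih =>
    have hsas : PySem.List.sorted (xs ++ [x]) f false
        = PySem.List.insertBy (fun a b => decide (f a < f b)) x (PySem.List.sorted xs f false) := by
      rw [PySem.List.sorted_eq_foldl_insertBy, PySem.List.sorted_eq_foldl_insertBy, List.foldl_append]; rfl
    have hks_pair : (PySem.List.sorted (PySem.List.dedup (xs.map f)) (fun k => k) false).Pairwise (· < ·) := by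
      rw [PySem.List.dedup_eq_ofList]
      exact PySem.List.sorted_ofList_pairwise_lt (xs.map f)
    have hks_mem : ∀ k, k ∈ PySem.List.sorted (PySem.List.dedup (xs.map f)) (fun k => k) false ↔ k ∈ xs.map f := by
      intro k
      rw [PySem.List.mem_sorted, PySem.List.dedup_eq_ofList, PySem.Set.mem_ofList]
    have hg : ∀ k ∈ PySem.List.sorted (PySem.List.dedup (xs.map f)) (fun k => k) false,
        xs.filter (fun y => decide (f y = k)) ≠ [] ∧ ∀ y ∈ xs.filter (fun y => decide (f y = k)), f y = k := by
      intro k hk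
      constructor
      · rcases List.mem_map.1 ((hks_mem k).1 hk) with ⟨y, hy, hfy⟩
        intro hnil
        rw [List.filter_eq_nil_iff] at hnil
        exact hnil y hy (by simp [hfy])
      · intro y hy
        have := List.of_mem_filter hy
        simpa using this
    rw [hsas, ih, List.map_append, List.map_singleton]
    by_cases hmem : f x ∈ xs.map f
    · rw [dedup_concat _ _ , if_pos hmem]
      rw [ins_blocks_mem f x _ _ hks_pair hg (by rw [hks_mem]; exact hmem)]
      apply flatMap_congr_mem
      intro k hk
      rw [List.filter_append]
      by_cases hkfx : k = f x
      · rw [if_pos hkfx, hkfx]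
        simp
      · rw [if_neg hkfx]
        have : ¬ (f x = k) := fun h => hkfx h.symm
        simp [this]
    · rw [dedup_concat _ _ , if_neg hmem]
      have hsk : PySem.List.sorted (PySem.List.dedup (xs.map f) ++ [f x]) (fun k => k) false
          = PySem.List.insertBy (fun a b => decide (a < b)) (f x)
              (PySem.List.sorted (PySem.List.dedup (xs.map f)) (fun k => k) false) := by
        rw [PySem.List.sorted_eq_foldl_insertBy, PySem.List.sorted_eq_foldl_insertBy, List.foldl_append]; rfl
      rw [hsk, ins_blocks_new f x _ _ hks_pair hg (by rw [hks_mem]; exact hmem)]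
      apply flatMap_congr_mem
      intro k hk
      rw [List.filter_append]
      by_cases hkfx : k = f x
      · rw [if_pos hkfx, hkfx]
        have hnil : xs.filter (fun y => decide (f y = f x)) = [] := by
          rw [List.filter_eq_nil_iff]
          intro y hy
          simp only [decide_eq_true_eq]
          exact fun h => hmem (h ▸ List.mem_map_of_mem hy)
        rw [hnil]
        simp
      · rw [if_neg hkfx]
        have : ¬ (f x = k) := fun h => hkfx h.symm
        simp [this]

-- ---- B side ----

-- Python's tuple comparison (bool, str) is the lexicographic order on Lex (Bool × String)
theorem pairlt (b1 b2 : Bool) (s1 s2 : String) :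
    (decide (b1 < b2) || (!decide (b2 < b1) && decide (s1 < s2)))
      = decide (toLex (b1, s1) < toLex (b2, s2)) := by
  cases b1 <;> cases b2 <;> simp [Prod.Lex.lt_iff, Bool.lt_iff]

theorem B_sorted2_eq (rows : List (List String)) (cc : Int) :
    PySem.List.sorted2 rows (fun r => pvKeyB cc r == "Unassigned") (fun r => pvKeyB cc r) false
      = PySem.List.sorted rows (fun r => toLex (pvKeyB cc r == "Unassigned", pvKeyB cc r)) false := by
  simp only [PySem.List.sorted2, PySem.List.sorted, if_neg (by decide : ¬ (false = true))]
  congr 1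
  funext acc x
  congr 1
  funext a b
  exact pairlt _ _ _ _

theorem dedup_map_inj {α β : Type} [BEq α] [LawfulBEq α] [BEq β] [LawfulBEq β]
    (g : α → β) (hg : Function.Injective g) (l : List α) :
    PySem.List.dedup (l.map g) = (PySem.List.dedup l).map g := by
  induction l using List.reverseRecOn with
  | nil => rfl
  | append_singleton l a ih =>
    rw [List.map_append, List.map_singleton, dedup_concat, dedup_concat, ih]
    by_cases h : a ∈ l
    · rw [if_pos (List.mem_map_of_mem h), if_pos h]
    · rw [if_neg (fun hm => h (by rcases List.mem_map.1 hm with ⟨b, hb, hba⟩; rwa [← hg hba])), if_neg h]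
      simp

theorem pvOrder_perm (rows : List (List String)) (cc : Int) :
    (pvOrder cc rows).Perm (PySem.List.dedup (rows.map (pvClsA cc))) := by
  set D := PySem.List.dedup (rows.map (pvClsA cc)) with hD
  have h1 : (PySem.List.sorted (D.filter (fun k => k != "Unassigned")) (fun k => k) false).Perm
      (D.filter (fun k => k != "Unassigned")) := PySem.List.sorted_perm _ _ _
  have htail : (if "Unassigned" ∈ D then ["Unassigned"] else [])
      = D.filter (fun k => !(k != "Unassigned")) := by
    have : D.filter (fun k => !(k != "Unassigned")) = D.filter (fun k => k == "Unassigned") := by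
      apply List.filter_congr; intro x _; simp [bne]
    rw [this, List.filter_beq]
    by_cases h : "Unassigned" ∈ D
    · rw [List.count_eq_one_of_mem (PySem.List.nodup_dedup _) h]
      simp [h]
    · rw [List.count_eq_zero.2 h]
      simp [h]
  have h2 : pvOrder cc rows
      = PySem.List.sorted (D.filter (fun k => k != "Unassigned")) (fun k => k) false
        ++ D.filter (fun k => !(k != "Unassigned")) := by
    rw [pvOrder, ← hD, htail]
  rw [h2]
  exact (h1.append_right _).trans (List.filter_append_perm _ D)

theorem pvOrder_nodup (rows : List (List String)) (cc : Int) : (pvOrder cc rows).Nodup :=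
  (pvOrder_perm rows cc).nodup_iff.2 (PySem.List.nodup_dedup _)

def pvG (c : String) : Lex (Bool × String) := toLex (c == "Unassigned", c)

theorem pvG_inj : Function.Injective pvG := by
  intro a b h
  exact congrArg (fun x => (ofLex x).2) h

theorem pvG_lt_ff (a b : String) (ha : a ≠ "Unassigned") (hb : b ≠ "Unassigned") (h : a < b) :
    pvG a < pvG b := by
  rw [pvG, pvG, Prod.Lex.lt_iff]
  right
  simp [beq_eq_false_iff_ne.2 ha, beq_eq_false_iff_ne.2 hb, h]

theorem pvG_lt_fu (a : String) (ha : a ≠ "Unassigned") : pvG a < pvG "Unassigned" := by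
  rw [pvG, pvG, Prod.Lex.lt_iff]
  left
  simp [beq_eq_false_iff_ne.2 ha, Bool.lt_iff]

theorem pvOrder_pairwiseG (rows : List (List String)) (cc : Int) :
    (pvOrder cc rows).Pairwise (fun a b => pvG a < pvG b) := by
  rw [pvOrder, List.pairwise_append]
  refine ⟨?_, ?_, ?_⟩
  · have hle := PySem.List.sorted_pairwise ((PySem.List.dedup (rows.map (pvClsA cc))).filter (fun k => k != "Unassigned")) (fun k => k)
    have hnd : (PySem.List.sorted ((PySem.List.dedup (rows.map (pvClsA cc))).filter (fun k => k != "Unassigned")) (fun k => k) false).Nodup :=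
      (PySem.List.sorted_perm _ _ _).nodup_iff.2 ((PySem.List.nodup_dedup _).filter _)
    have hlt := (hle.and hnd).imp (fun h => lt_of_le_of_ne h.1 h.2)
    have hmemne : ∀ x ∈ PySem.List.sorted ((PySem.List.dedup (rows.map (pvClsA cc))).filter (fun k => k != "Unassigned")) (fun k => k) false, x ≠ "Unassigned" := by
      intro x hx
      rw [PySem.List.mem_sorted] at hx
      have := List.of_mem_filter hx
      simpa using this
    exact hlt.imp_of_mem (fun {a b} ha hb h => pvG_lt_ff a b (hmemne a ha) (hmemne b hb) h)
  · split_ifs <;> simp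
  · intro a ha b hb
    have hbU : b = "Unassigned" := by
      rcases em ("Unassigned" ∈ PySem.List.dedup (rows.map (pvClsA cc))) with h | h
      · rw [if_pos h] at hb; simpa using hb
      · rw [if_neg h] at hb; simp at hb
    have haU : a ≠ "Unassigned" := by
      rw [PySem.List.mem_sorted] at ha
      have := List.of_mem_filter ha
      simpa using this
    rw [hbU]
    exact pvG_lt_fu a haU

theorem B_sorted_blocks (rows : List (List String)) (cc : Int) :
    PySem.List.sorted rows (fun r => toLex (pvKeyB cc r == "Unassigned", pvKeyB cc r)) false
      = (pvOrder cc rows).flatMap (fun c => rows.filter (fun r => pvClsA cc r == c)) := by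
  have hKey : (fun r => toLex ((pvKeyB cc r == "Unassigned" : Bool), pvKeyB cc r)) = (fun r => pvG (pvClsA cc r)) := rfl
  rw [hKey, stable_sort_eq_blocks]
  have hmap : rows.map (fun r => pvG (pvClsA cc r)) = (rows.map (pvClsA cc)).map pvG := by
    rw [List.map_map]; rfl
  rw [hmap, dedup_map_inj pvG pvG_inj]
  have hsorted : PySem.List.sorted ((PySem.List.dedup (rows.map (pvClsA cc))).map pvG) (fun k => k) false
      = (pvOrder cc rows).map pvG :=
    PySem.List.sorted_eq_of_perm_of_pairwise_lt _ _ _ ((pvOrder_perm rows cc).map pvG)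
      (List.pairwise_map.2 (pvOrder_pairwiseG rows cc))
  rw [hsorted, List.flatMap_map]
  apply flatMap_congr_mem
  intro c _
  apply List.filter_congr
  intro r _
  have hiff : (pvG (pvClsA cc r) = pvG c) ↔ (pvClsA cc r = c) := ⟨fun h => pvG_inj h, fun h => by rw [h]⟩
  rw [decide_eq_decide.2 hiff]
  exact (Bool.beq_eq_decide_eq _ _).symm

theorem scan_const_block (key : List String → String) :
    ∀ (b : List (List String)) (rs : List (List String)) (out : List (String × List (List String)))
      (k : String) (g : List (List String)),
      (∀ r ∈ b, key r = k) →
      pvScanGo key (out ++ [(k, g)]) (b ++ rs) = pvScanGo key (out ++ [(k, g ++ b)]) rs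
  | [], rs, out, k, g, _ => by simp
  | r :: b, rs, out, k, g, hb => by
    rw [List.cons_append, pvScanGo, List.getLast?_concat]
    simp only []
    rw [if_pos (hb r (by simp)).symm, List.dropLast_concat]
    rw [scan_const_block key b rs out k (g ++ [r]) (fun z hz => hb z (by simp [hz]))]
    simp

theorem scan_blocks (key : List String → String) :
    ∀ (ks : List String) (B : String → List (List String)) (out : List (String × List (List String))),
      ks.Nodup →
      (∀ k ∈ ks, B k ≠ [] ∧ ∀ r ∈ B k, key r = k) →
      (∀ p, out.getLast? = some p → p.1 ∉ ks) →
      pvScanGo key out (ks.flatMap B) = out ++ ks.map (fun k => (k, B k))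
  | [], B, out, _, _, _ => by simp [pvScanGo]
  | k :: ks, B, out, hnd, hB, hout => by
    obtain ⟨r, b, hrb⟩ : ∃ r b, B k = r :: b := by
      rcases hx : B k with _ | ⟨r, b⟩
      · exact absurd hx (hB k (by simp)).1
      · exact ⟨r, b, rfl⟩
    have hkey : key r = k := (hB k (by simp)).2 r (by rw [hrb]; simp)
    have hnd' := List.nodup_cons.1 hnd
    have step : pvScanGo key out ((k :: ks).flatMap B)
        = pvScanGo key (out ++ [(k, [r])]) (b ++ ks.flatMap B) := by
      rw [List.flatMap_cons, hrb, List.cons_append, pvScanGo]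
      rcases hlast : out.getLast? with _ | p
      · simp only [hkey]
      · simp only []
        rw [if_neg]
        · simp [hkey]
        · rw [hkey]
          exact fun h => (hout p hlast) (by rw [h]; simp)
    rw [step, scan_const_block key b _ _ _ _ (fun z hz => (hB k (by simp)).2 z (by rw [hrb]; simp [hz]))]
    rw [show ([r] ++ b) = B k by rw [hrb]; rfl]
    rw [scan_blocks key ks B (out ++ [(k, B k)]) hnd'.2
        (fun k' hk' => hB k' (by simp [hk']))
        (fun p hp => by
          rw [List.getLast?_concat] at hp
          injection hp with hp
          rw [← hp]
          exact hnd'.1)]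
    simp

theorem B_char (rows : List (List String)) (cc : Int) :
    group_summary_rows_by_class_py_alt rows cc = pvTarget cc rows := by
  rw [group_summary_rows_by_class_py_alt, B_sorted2_eq, B_sorted_blocks]
  rw [scan_blocks (pvKeyB cc) (pvOrder cc rows) (fun c => rows.filter (fun r => pvClsA cc r == c)) []
      (pvOrder_nodup rows cc)
      (fun k hk => by
        constructor
        · have hkD : k ∈ PySem.List.dedup (rows.map (pvClsA cc)) := (pvOrder_perm rows cc).mem_iff.1 hk
          have hkM : k ∈ rows.map (pvClsA cc) := (PySem.List.mem_dedup _ _).1 hkD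
          rcases List.mem_map.1 hkM with ⟨r, hr, hcr⟩
          intro hnil
          rw [List.filter_eq_nil_iff] at hnil
          exact hnil r hr (by simp [hcr])
        · intro r hr
          have := List.of_mem_filter hr
          exact beq_iff_eq.1 this)
      (fun p hp => by simp at hp)]
  rw [List.nil_append]
  rfl

-- ===== VERDICT (by name: the statement is the Claim_ definition above) =====
theorem group_summary_rows_by_class_py_spec : Claim_equal_group_summary_rows_by_class_py := by
  intro rows class_col _ _
  unfold Spec_group_summary_rows_by_class_py
  rw [A_char, B_char]
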